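-- pv_equiv track=rewrite | github.com/chea-young/solve_Algorithm | 백준/17299(오등큰수).py | solution
-- ===== SOURCE A (Python) =====
-- def solution(N, nums):
--     # 숫자가 등장한 횟수 찾기
--     num_cnt = {} # 해당 숫자의 갯수를 찾는 리스트
--     for n in nums:
--         num_cnt[n] = num_cnt.get(n, 0) +1
--
--     answer = [-1] * N
--     max_num = (0, 0) # 숫자, 등장한 횟수
--     for i in range(N-1, -1, -1):
--         ncnt = num_cnt[nums[i]]
--         temp = max_num[1] - ncnt
--         if max_num[0] != 0 and temp > 0:
--             answer[i] = temp
--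
--         if max_num[1] <= ncnt:
--             max_num = (nums[i], ncnt)
--     return answer
-- ===== SOURCE B (Python) =====
-- def solution(N, nums):
--     # count occurrences
--     cnt = {}
--     for n in nums:
--         cnt[n] = cnt.get(n, 0) + 1
--     # rsuffix[N - j] = (count, elem) of the running max-frequency element of nums[j:N]
--     # (ties resolved towards the earlier index, matching a >= update); rsuffix[0] = (0, 0)
--     rsuffix = [(0, 0)]
--     for i in range(N - 1, -1, -1):
--         c = cnt[nums[i]]
--         sc, se = rsuffix[-1]
--         rsuffix.append((c, nums[i]) if c >= sc else (sc, se))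
--     suffix = rsuffix[::-1]
--     # forward pass: answer[i] reads the suffix table at i+1
--     answer = []
--     for i in range(N):
--         c = cnt[nums[i]]
--         sc, se = suffix[i + 1]
--         answer.append(sc - c if se != 0 and sc - c > 0 else -1)
--     return answer
-- ===== Notes on version B (the rewrite author's own statement) =====
-- stated objective: alternative
-- what changed: A makes one backward pass that carries a running (element, count) maximum and mutates a preallocated answer list in place; B first builds an explicit suffix max-frequency table in a backward pass and then builds the answer front-to-back in a separate forward pass reading that table.
import Mathlib
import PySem

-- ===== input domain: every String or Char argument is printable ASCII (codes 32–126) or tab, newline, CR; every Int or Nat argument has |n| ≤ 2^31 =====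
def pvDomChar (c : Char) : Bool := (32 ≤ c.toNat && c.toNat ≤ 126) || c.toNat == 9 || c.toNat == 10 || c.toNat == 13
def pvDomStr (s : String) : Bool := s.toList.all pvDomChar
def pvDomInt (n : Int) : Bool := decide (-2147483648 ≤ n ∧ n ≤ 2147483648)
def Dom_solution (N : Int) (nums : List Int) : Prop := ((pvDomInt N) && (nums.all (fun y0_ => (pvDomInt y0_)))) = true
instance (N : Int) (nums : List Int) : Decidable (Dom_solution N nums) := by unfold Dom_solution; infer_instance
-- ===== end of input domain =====

-- B replaces A's single backward loop that mutates a preallocated answer list in place by a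
-- suffix max-frequency table built backward plus a separate forward pass that builds the answer
-- (objective: alternative decomposition, same asymptotic cost).

-- ===== PORT A =====
-- the counting loop 'for n in nums: num_cnt[n] = num_cnt.get(n, 0) + 1'
def cntA (nums : List Int) : PySem.Dict Int Int :=
  nums.foldl (fun d n => d.insert n (d.getD n 0 + 1)) (PySem.Dict.mk [])

-- one iteration of A's backward loop; state = (answer, max_num).
-- nums[i]: under Pre_ every index of the range is in range, so the .getD 0 default is never hit;
-- num_cnt[nums[i]]: the key is always present (nums[i] ∈ nums), so .getD 0 is the plain lookup;
-- answer[i] = temp: i is nonnegative here, so .toNat is exact.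
def stepA (numCnt : PySem.Dict Int Int) (nums : List Int)
    (st : List Int × Int × Int) (i : Int) : List Int × Int × Int :=
  let ncnt := numCnt.getD (PySem.List.pyGetD nums i 0) 0
  let temp := st.2.2 - ncnt
  let answer := if st.2.1 ≠ 0 ∧ temp > 0 then st.1.set i.toNat temp else st.1
  let maxNum := if st.2.2 ≤ ncnt then (PySem.List.pyGetD nums i 0, ncnt) else st.2
  (answer, maxNum)

def solution (N : Int) (nums : List Int) : List Int :=
  let numCnt := cntA nums
  let answer := PySem.List.pyRepeat [(-1 : Int)] N
  ((PySem.List.pyRange (N - 1) (-1) (-1)).foldl (stepA numCnt nums) (answer, (0, 0))).1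

-- ===== PORT B =====
-- the same counting loop (Source B builds cnt the same way)
def cntB (nums : List Int) : PySem.Dict Int Int :=
  nums.foldl (fun d n => d.insert n (d.getD n 0 + 1)) (PySem.Dict.mk [])

-- one iteration of Source B's backward table loop: rsuffix.append(…) reading rsuffix[-1]
def stepB (cnt : PySem.Dict Int Int) (nums : List Int)
    (rs : List (Int × Int)) (i : Int) : List (Int × Int) :=
  let c := cnt.getD (PySem.List.pyGetD nums i 0) 0
  let s := PySem.List.pyGetD rs (-1) (0, 0)
  rs ++ [if c ≥ s.1 then (c, PySem.List.pyGetD nums i 0) else s]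

-- one iteration of Source B's forward pass: answer.append(…) reading suffix[i+1]
def stepBF (cnt : PySem.Dict Int Int) (nums : List Int) (suffix : List (Int × Int))
    (ans : List Int) (i : Int) : List Int :=
  let c := cnt.getD (PySem.List.pyGetD nums i 0) 0
  let s := PySem.List.pyGetD suffix (i + 1) (0, 0)
  ans ++ [if s.2 ≠ 0 ∧ s.1 - c > 0 then s.1 - c else -1]

def solution_alt (N : Int) (nums : List Int) : List Int :=
  let cnt := cntB nums
  let rsuffix := (PySem.List.pyRange (N - 1) (-1) (-1)).foldl (stepB cnt nums) [(0, 0)]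
  -- rsuffix[::-1]; slice? is some on every input (its step, -1, is nonzero)
  let suffix := (PySem.List.slice? rsuffix none none (-1)).getD []
  (PySem.List.pyRange 0 N 1).foldl (stepBF cnt nums suffix) []

-- ===== PRECONDITION & SPEC =====
-- A raises IndexError (nums[i]) exactly when N > len(nums); it returns on every other input
-- (N ≤ 0 included, returning []), so Pre_ is exactly A's domain.
def Pre_solution (N : Int) (nums : List Int) : Prop := N ≤ (nums.length : Int)
instance (N : Int) (nums : List Int) : Decidable (Pre_solution N nums) := by
  unfold Pre_solution; infer_instance

def pvWitness_solution : Int × List Int := (5, [1, 1, 2, 3, 3])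

def Spec_solution (N : Int) (nums : List Int) (out : List Int) : Prop := out = solution_alt N nums
instance (N : Int) (nums : List Int) (out : List Int) : Decidable (Spec_solution N nums out) := by
  unfold Spec_solution; infer_instance

-- ===== CLAIM (what is proved, stated in full; the proofs are below) =====
def Claim_equal_solution : Prop := ∀ (N : Int) (nums : List Int),
  Dom_solution N nums → Pre_solution N nums → Spec_solution N nums (solution N nums)

-- ===== LEMMAS AND PROOFS =====

-- reference versions of the suffix table and of the answer list, by structural recursion on the
-- processed segment of nums (proof-side only)
def sufl (cnt : PySem.Dict Int Int) : List Int → List (Int × Int)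
  | [] => [(0, 0)]
  | v :: t =>
    let s := sufl cnt t
    let h := s.headD (0, 0)
    (if cnt.getD v 0 ≥ h.1 then (cnt.getD v 0, v) else h) :: s

def ansl (cnt : PySem.Dict Int Int) : List Int → List Int
  | [] => []
  | v :: t =>
    let h := (sufl cnt t).headD (0, 0)
    (if h.2 ≠ 0 ∧ h.1 - cnt.getD v 0 > 0 then h.1 - cnt.getD v 0 else -1) :: ansl cnt t

-- countdown range, splitting off the last processed index
theorem countdown_snoc (a b : Int) (h : b ≤ a) :
    PySem.List.pyRange a (b - 1) (-1) = PySem.List.pyRange a b (-1) ++ [b] := by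
  rw [PySem.List.pyRange_neg_one_eq_reverse, PySem.List.pyRange_neg_one_eq_reverse]
  rw [show b - 1 + 1 = b by ring, PySem.List.pyRange_one_cons (by omega : b < a + 1)]
  simp

theorem sufl_getD (cnt : PySem.Dict Int Int) (l : List Int) :
    ∀ (j : Nat), j ≤ l.length →
      PySem.List.pyGetD (sufl cnt l) (j : Int) (0, 0) = (sufl cnt (l.drop j)).headD (0, 0) := by
  induction l with
  | nil =>
    intro j hj
    obtain rfl : j = 0 := by simpa using hj
    simp [sufl]
  | cons v t ih =>
    intro j hj
    cases j with
    | zero => simp [sufl]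
    | succ j =>
      have := ih j (by simpa using hj)
      rw [PySem.List.pyGetD_natCast] at this ⊢
      simpa [sufl, List.getD] using this

theorem suffix_fold_eq (cnt : PySem.Dict Int Int) (nums : List Int) (n : Nat)
    (hn : n ≤ nums.length) (k : Nat) :
    ∀ (a : Nat), a + k = n →
      (PySem.List.pyRange ((n : Int) - 1) ((a : Int) - 1) (-1)).foldl (stepB cnt nums) [(0, 0)]
        = (sufl cnt ((nums.take n).drop a)).reverse := by
  induction k with
  | zero =>
    intro a ha
    rw [PySem.List.pyRange_neg_one_eq_nil (by omega)]
    have hnil : ((nums.take n).drop a) = [] := List.drop_eq_nil_of_le (by simp; omega)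
    rw [hnil]
    simp [sufl]
  | succ k ih =>
    intro a ha
    rw [countdown_snoc _ _ (by omega : (a : Int) ≤ (n : Int) - 1), List.foldl_append]
    have hih := ih (a + 1) (by omega)
    rw [show (((a + 1 : Nat) : Int) - 1) = ((a : Nat) : Int) by push_cast; ring] at hih
    rw [hih]
    have hlt : a < (nums.take n).length := by simp; omega
    have hseg : (nums.take n).drop a = (nums.take n)[a] :: (nums.take n).drop (a + 1) :=
      List.drop_eq_getElem_cons hlt
    have hv : PySem.List.pyGetD nums ((a : Nat) : Int) 0 = (nums.take n)[a] := by
      rw [PySem.List.pyGetD_natCast, List.getD_eq_getElem _ _ (by omega : a < nums.length)]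
      simp [List.getElem_take]
    obtain ⟨p, m, hm⟩ : ∃ p m, sufl cnt ((nums.take n).drop (a + 1)) = p :: m := by
      cases ((nums.take n).drop (a + 1)) <;> exact ⟨_, _, rfl⟩
    have hs : PySem.List.pyGetD ((sufl cnt ((nums.take n).drop (a + 1))).reverse) (-1) (0, 0)
        = (sufl cnt ((nums.take n).drop (a + 1))).headD (0, 0) := by
      rw [hm]
      simp [PySem.List.pyGetD_neg_one_append_singleton]
    rw [hseg]
    simp only [List.foldl_cons, List.foldl_nil, stepB, sufl, hv, hs, List.reverse_cons]

theorem answer_fold_eq (cnt : PySem.Dict Int Int) (nums : List Int) (n : Nat)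
    (hn : n ≤ nums.length) (k : Nat) :
    ∀ (a : Nat), a + k = n → ∀ (ans : List Int), ans.length = n →
      (∀ j : Nat, a ≤ j → j < n → ans[j]? = some (-1)) →
      (PySem.List.pyRange ((n : Int) - 1) ((a : Int) - 1) (-1)).foldl (stepA cnt nums) (ans, (0, 0))
        = (ans.take a ++ ansl cnt ((nums.take n).drop a),
           ((sufl cnt ((nums.take n).drop a)).headD (0, 0)).2,
           ((sufl cnt ((nums.take n).drop a)).headD (0, 0)).1) := by
  induction k with
  | zero =>
    intro a ha ans hlen _
    rw [PySem.List.pyRange_neg_one_eq_nil (by omega)]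
    have hnil : ((nums.take n).drop a) = [] := List.drop_eq_nil_of_le (by simp; omega)
    rw [hnil]
    simp [sufl, ansl, List.take_of_length_le (by omega : ans.length ≤ a)]
  | succ k ih =>
    intro a ha ans hlen hdef
    rw [countdown_snoc _ _ (by omega : (a : Int) ≤ (n : Int) - 1), List.foldl_append]
    have hih := ih (a + 1) (by omega) ans hlen (fun j h1 h2 => hdef j (by omega) h2)
    rw [show (((a + 1 : Nat) : Int) - 1) = ((a : Nat) : Int) by push_cast; ring] at hih
    rw [hih]
    have hlt : a < (nums.take n).length := by simp; omega
    have hseg : (nums.take n).drop a = (nums.take n)[a] :: (nums.take n).drop (a + 1) :=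
      List.drop_eq_getElem_cons hlt
    have hv : PySem.List.pyGetD nums ((a : Nat) : Int) 0 = (nums.take n)[a] := by
      rw [PySem.List.pyGetD_natCast, List.getD_eq_getElem _ _ (by omega : a < nums.length)]
      simp [List.getElem_take]
    have htake : ans.take (a + 1) = ans.take a ++ [-1] := by
      rw [List.take_add_one, hdef a (le_refl a) (by omega)]
      rfl
    have hlen' : (ans.take a).length = a := by simp; omega
    rw [hseg]
    simp only [List.foldl_cons, List.foldl_nil, stepA, ansl, sufl, hv, htake,
      Int.toNat_natCast, List.headD_cons, Prod.mk.injEq, List.append_assoc,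
      List.singleton_append]
    constructor
    · split_ifs with hc
      · rw [List.set_append_right _ _ (by omega)]
        simp [hlen']
      · rfl
    · by_cases hm : ((sufl cnt ((nums.take n).drop (a + 1))).headD (0, 0)).1 ≤
          cnt.getD (nums.take n)[a] 0
      · rw [if_pos hm, if_pos (show cnt.getD (nums.take n)[a] 0 ≥
          ((sufl cnt ((nums.take n).drop (a + 1))).headD (0, 0)).1 from hm)]
      · rw [if_neg hm, if_neg (show ¬ cnt.getD (nums.take n)[a] 0 ≥
          ((sufl cnt ((nums.take n).drop (a + 1))).headD (0, 0)).1 from hm)]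

theorem forward_fold_eq (cnt : PySem.Dict Int Int) (nums : List Int) (n : Nat)
    (hn : n ≤ nums.length) (k : Nat) :
    ∀ (a : Nat), a + k = n → ∀ (acc : List Int),
      (PySem.List.pyRange ((a : Nat) : Int) ((n : Nat) : Int) 1).foldl
          (stepBF cnt nums (sufl cnt (nums.take n))) acc
        = acc ++ ansl cnt ((nums.take n).drop a) := by
  induction k with
  | zero =>
    intro a ha acc
    rw [PySem.List.pyRange_one_eq_nil (by omega)]
    have hnil : ((nums.take n).drop a) = [] := List.drop_eq_nil_of_le (by simp; omega)
    rw [hnil]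
    simp [ansl]
  | succ k ih =>
    intro a ha acc
    rw [PySem.List.pyRange_one_cons (by omega : ((a : Nat) : Int) < ((n : Nat) : Int)),
      List.foldl_cons]
    have hlt : a < (nums.take n).length := by simp; omega
    have hseg : (nums.take n).drop a = (nums.take n)[a] :: (nums.take n).drop (a + 1) :=
      List.drop_eq_getElem_cons hlt
    have hv : PySem.List.pyGetD nums ((a : Nat) : Int) 0 = (nums.take n)[a] := by
      rw [PySem.List.pyGetD_natCast, List.getD_eq_getElem _ _ (by omega : a < nums.length)]
      simp [List.getElem_take]
    have hcast : ((a : Nat) : Int) + 1 = (((a + 1 : Nat)) : Int) := by push_cast; ring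
    have hsuf := sufl_getD cnt (nums.take n) (a + 1) (by simp; omega)
    have hstep : stepBF cnt nums (sufl cnt (nums.take n)) acc ((a : Nat) : Int)
        = acc ++ [if ((sufl cnt ((nums.take n).drop (a + 1))).headD (0, 0)).2 ≠ 0 ∧
              ((sufl cnt ((nums.take n).drop (a + 1))).headD (0, 0)).1 -
                cnt.getD (nums.take n)[a] 0 > 0
            then ((sufl cnt ((nums.take n).drop (a + 1))).headD (0, 0)).1 -
                cnt.getD (nums.take n)[a] 0
            else -1] := by
      simp only [stepBF, hv, hcast, hsuf]
    rw [hstep, hcast, ih (a + 1) (by omega), hseg]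
    simp [ansl]

theorem cnt_same (nums : List Int) : cntB nums = cntA nums := rfl

theorem solution_spec : Claim_equal_solution := by
  intro N nums _ hpre
  unfold Spec_solution
  by_cases hN : N ≤ 0
  · have h1 : PySem.List.pyRange (N - 1) (-1) (-1) = [] :=
      PySem.List.pyRange_neg_one_eq_nil (by omega)
    have h2 : PySem.List.pyRange 0 N 1 = [] := PySem.List.pyRange_one_eq_nil (by omega)
    simp [solution, solution_alt, h1, h2, PySem.List.pyRepeat_singleton,
      Int.toNat_of_nonpos hN]
  · rw [not_le] at hN
    obtain ⟨n, rfl⟩ : ∃ n : Nat, N = (n : Int) := ⟨N.toNat, (Int.toNat_of_nonneg hN.le).symm⟩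
    have hnlen : n ≤ nums.length := by
      unfold Pre_solution at hpre; exact_mod_cast hpre
    have hA := answer_fold_eq (cntA nums) nums n hnlen n 0 (by omega)
      (List.replicate n (-1)) (by simp)
      (fun j _ h2 => by simp [h2])
    have hS := suffix_fold_eq (cntB nums) nums n hnlen n 0 (by omega)
    have hF := forward_fold_eq (cntB nums) nums n hnlen n 0 (by omega) []
    simp only [Nat.cast_zero, zero_sub, List.take_zero, List.drop_zero,
      List.nil_append] at hA hS hF
    simp only [solution, solution_alt, PySem.List.pyRepeat_singleton, Int.toNat_natCast]
    rw [hA, hS, PySem.List.slice?_none_none_neg_one]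
    simp only [Option.getD_some, List.reverse_reverse]
    rw [hF, cnt_same]
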